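-- pv_equiv track=rewrite | github.com/sepiabrown/scaffoldr | src/scaffoldr/core/graphs.py | _to_facade_zone
-- ===== SOURCE A (Python) =====
-- def _to_facade_zone(mod: str, facade_set: set[str] | frozenset[str]) -> str:
--     """Find the deepest facade-bearing package containing *mod*.
--
--     Walks up from the module to its ancestors, returning the deepest
--     ancestor that has an ``__init__.py`` facade (i.e., is a key in
--     *facade_set*).  Falls back to the top-level package if no facade
--     ancestor is found.
--
--     Examples (given facades = {"myapp", "myapp.tasks", "myapp.tasks.detection"}):
--         "myapp.tasks.detection.commands" -> "myapp.tasks.detection"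
--         "myapp.tasks.generation.train.loss"      -> "myapp.tasks"  (if myapp.tasks.generation has no facade)
--         "myapp.cli.admin"                           -> "myapp.cli"    (if myapp.cli is a facade)
--     """
--     parts = mod.split(".")
--     # If the module itself is a facade, it IS its own zone
--     if mod in facade_set:
--         return mod
--     # Walk from deepest to shallowest, find the deepest facade ancestor
--     for depth in range(len(parts) - 1, 0, -1):
--         candidate = ".".join(parts[:depth])
--         if candidate in facade_set:
--             return candidate
--     # Fallback: top-level package name
--     return parts[0]
-- ===== SOURCE B (Python) =====
-- def _to_facade_zone(mod, facade_set):
--     if mod in facade_set: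
--         return mod
--     parts = mod.split(".")
--     prefix = parts[0]
--     best = parts[0]
--     for part in parts[1:-1]:
--         prefix = prefix + "." + part
--         if prefix in facade_set:
--             best = prefix
--     return best
-- ===== Notes on version B (the rewrite author's own statement) =====
-- stated objective: alternative
-- what changed: A walks depths from deepest to shallowest, re-slicing and re-joining parts[:depth] each step and returning the first facade hit; B makes one forward pass that accumulates the dotted prefix incrementally and keeps the last (deepest) matching prefix, returning parts[0] when none matched.
import Mathlib
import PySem

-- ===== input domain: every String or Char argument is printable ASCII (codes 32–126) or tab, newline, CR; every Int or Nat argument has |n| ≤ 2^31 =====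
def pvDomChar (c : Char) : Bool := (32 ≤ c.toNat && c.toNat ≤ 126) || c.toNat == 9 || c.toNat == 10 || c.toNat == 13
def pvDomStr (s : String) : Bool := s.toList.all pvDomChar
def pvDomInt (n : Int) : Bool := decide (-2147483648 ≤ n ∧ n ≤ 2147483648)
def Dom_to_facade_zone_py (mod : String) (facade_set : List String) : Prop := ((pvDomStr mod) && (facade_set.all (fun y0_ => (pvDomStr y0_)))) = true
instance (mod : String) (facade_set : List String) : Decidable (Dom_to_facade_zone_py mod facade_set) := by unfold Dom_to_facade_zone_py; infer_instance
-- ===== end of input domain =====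

-- B replaces A's backward walk (slicing parts[:depth] for each depth, first match returns)
-- by a single forward accumulating pass over the parts that keeps the last (deepest)
-- matching prefix; objective: alternative decomposition (same cost class).

-- ===== PORT A =====
-- literal port of A's 'for depth in range(len(parts)-1, 0, -1): …; return parts[0]'
def pvALoop (parts : List String) (facade_set : PySem.Set String) : List Int → String
  | [] => (PySem.List.pyGet? parts 0).getD ""
  | depth :: rest =>
      let candidate := PySem.Str.join "." (PySem.List.slice parts none (some depth))
      if facade_set.contains candidate then candidate
      else pvALoop parts facade_set rest

def to_facade_zone_py (mod : String) (facade_set : List String) : String :=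
  let parts := (PySem.Str.split? mod ".").getD []
  if PySem.Set.contains facade_set mod then mod
  else pvALoop parts facade_set (PySem.List.pyRange ((parts.length : Int) - 1) 0 (-1))

-- ===== PORT B =====
-- literal port of Source B's loop body: prefix = prefix + "." + part; keep last match in best
def pvBStep (facade_set : PySem.Set String) (st : String × String) (part : String) : String × String :=
  let pre := st.1 ++ "." ++ part
  if facade_set.contains pre then (pre, pre) else (pre, st.2)

def to_facade_zone_py_alt (mod : String) (facade_set : List String) : String :=
  if PySem.Set.contains facade_set mod then mod
  else
    let parts := (PySem.Str.split? mod ".").getD []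
    let p0 := (PySem.List.pyGet? parts 0).getD ""
    let st := (PySem.List.slice parts (some 1) (some (-1))).foldl (pvBStep facade_set) (p0, p0)
    st.2

-- ===== PRECONDITION & SPEC =====
def Spec_to_facade_zone_py (mod : String) (facade_set : List String) (out : String) : Prop := out = to_facade_zone_py_alt mod facade_set
instance (mod : String) (facade_set : List String) (out : String) : Decidable (Spec_to_facade_zone_py mod facade_set out) := by unfold Spec_to_facade_zone_py; infer_instance

-- ===== CLAIM (what is proved, stated in full; the proofs are below) =====
def Claim_equal_to_facade_zone_py : Prop := ∀ (mod : String) (facade_set : List String), Dom_to_facade_zone_py mod facade_set → Spec_to_facade_zone_py mod facade_set (to_facade_zone_py mod facade_set)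

-- ===== LEMMAS AND PROOFS =====

-- common reference: check prefixes of depth m, m-1, …, 1, fallback parts[0]
def pvRef (parts : List String) (S : PySem.Set String) : Nat → String
  | 0 => (PySem.List.pyGet? parts 0).getD ""
  | k+1 =>
      let c := PySem.Str.join "." (parts.take (k+1))
      if S.contains c then c else pvRef parts S k

theorem pvRef_succ (parts : List String) (S : PySem.Set String) (k : Nat) :
    pvRef parts S (k+1) =
      if S.contains (PySem.Str.join "." (parts.take (k+1)))
        then PySem.Str.join "." (parts.take (k+1)) else pvRef parts S k := by
  simp only [pvRef]

theorem pvBStep_eq (S : PySem.Set String) (st : String × String) (part : String) :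
    pvBStep S st part =
      (st.1 ++ "." ++ part,
        if S.contains (st.1 ++ "." ++ part) then st.1 ++ "." ++ part else st.2) := by
  simp only [pvBStep]
  split <;> rfl

-- snoc form of join for a nonempty list
theorem pvJoin_snoc (l : List String) (hl : l ≠ []) (x : String) :
    PySem.Str.join "." (l ++ [x]) = PySem.Str.join "." l ++ "." ++ x := by
  rw [← String.toList_inj]
  simp only [PySem.Str.toList_join, List.map_append, List.map_cons, List.map_nil,
    String.toList_append]
  induction l with
  | nil => exact absurd rfl hl
  | cons a t ih =>
      cases t with
      | nil =>
          simp [PySem.Chars.join_singleton, PySem.Chars.join_cons_cons]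
      | cons b t' =>
          simp only [List.map_cons, List.cons_append, PySem.Chars.join_cons_cons,
            List.append_assoc] at *
          rw [ih (by simp)]

theorem pvJoin_single (x : String) : PySem.Str.join "." [x] = x := by
  rw [← String.toList_inj]
  simp [PySem.Str.toList_join, PySem.Chars.join_singleton]

theorem pvGet0_cons (p0 : String) (rest : List String) :
    (PySem.List.pyGet? (p0 :: rest) 0).getD "" = p0 := by
  simp [PySem.List.pyGet?, PySem.List.pyIdx?]

-- A's loop equals the reference
theorem pvALoop_eq_ref (parts : List String) (S : PySem.Set String) (m : Nat) :
    pvALoop parts S (PySem.List.pyRange (m : Int) 0 (-1)) = pvRef parts S m := by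
  induction m with
  | zero => rw [PySem.List.pyRange_neg_one_eq_nil (by norm_num)]; rfl
  | succ k ih =>
      rw [PySem.List.pyRange_neg_one_cons (by positivity)]
      show (let candidate := PySem.Str.join "." (PySem.List.slice parts none (some ((k+1 : Nat) : Int)));
        if S.contains candidate then candidate
        else pvALoop parts S (PySem.List.pyRange (((k+1 : Nat) : Int) - 1) 0 (-1))) = _
      have h1 : (((k+1 : Nat) : Int) - 1) = (k : Int) := by push_cast; ring
      rw [h1, PySem.List.slice_to_natCast]
      simp only [pvRef, ih]

theorem pvSlice_one_neg_one {α : Type} (xs : List α) :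
    PySem.List.slice xs (some 1) (some (-1)) = xs.tail.dropLast := by
  simp [PySem.List.slice]
  cases xs with
  | nil => simp
  | cons a t => simp [List.dropLast_eq_take]

-- B's fold equals (prefix so far, reference value) on every initial segment
theorem pvBFold_inv (p0 : String) (rest : List String) (S : PySem.Set String)
    (j : Nat) (hj : j ≤ rest.dropLast.length) :
    (rest.dropLast.take j).foldl (pvBStep S) (p0, p0)
    = (PySem.Str.join "." ((p0 :: rest).take (j+1)), pvRef (p0 :: rest) S (j+1)) := by
  induction j with
  | zero =>
      simp only [List.take_zero, List.foldl_nil, List.take_succ_cons]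
      rw [pvJoin_single, pvRef_succ]
      simp only [List.take_succ_cons, List.take_zero]
      rw [pvJoin_single]
      have hr0 : pvRef (p0 :: rest) S 0 = p0 := pvGet0_cons p0 rest
      rw [hr0, ite_self]
  | succ k ih =>
      have hk : k ≤ rest.dropLast.length := Nat.le_of_succ_le hj
      have hlt : k < rest.dropLast.length := hj
      have hrl : k < rest.length := by
        have h := hlt; simp at h; omega
      rw [List.take_succ_eq_append_getElem hlt, List.foldl_append, ih hk]
      have hgetd : rest.dropLast[k] = rest[k]'hrl := List.getElem_dropLast ..
      have hklen : k + 1 < (p0 :: rest).length := by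
        simp only [List.length_cons]; omega
      have htake : (p0 :: rest).take (k+2) = (p0 :: rest).take (k+1) ++ [(p0 :: rest)[k+1]] :=
        List.take_succ_eq_append_getElem hklen
      have hne : (p0 :: rest).take (k+1) ≠ [] := by simp
      have hsnoc : PySem.Str.join "." ((p0 :: rest).take (k+2))
          = PySem.Str.join "." ((p0 :: rest).take (k+1)) ++ "." ++ (p0 :: rest)[k+1] := by
        rw [htake, pvJoin_snoc _ hne]
      have hidx : (p0 :: rest)[k+1]'hklen = rest[k]'hrl := by simp
      simp only [List.foldl_cons, List.foldl_nil, pvBStep_eq, hgetd, ← hidx, ← hsnoc]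
      rw [pvRef_succ (p0 :: rest) S (k+1)]

-- ===== VERDICT (by name: the statement is the Claim_ definition above) =====
theorem to_facade_zone_py_spec : Claim_equal_to_facade_zone_py := by
  intro mod facade_set _
  unfold Spec_to_facade_zone_py to_facade_zone_py to_facade_zone_py_alt
  by_cases hm : PySem.Set.contains facade_set mod = true
  · rw [if_pos hm, if_pos hm]
  · rw [if_neg hm, if_neg hm]
    show _ = (List.foldl (pvBStep facade_set)
        ((PySem.List.pyGet? ((PySem.Str.split? mod ".").getD []) 0).getD "",
         (PySem.List.pyGet? ((PySem.Str.split? mod ".").getD []) 0).getD "")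
        (PySem.List.slice ((PySem.Str.split? mod ".").getD []) (some 1) (some (-1)))).2
    rw [pvSlice_one_neg_one]
    generalize (PySem.Str.split? mod ".").getD [] = parts
    cases parts with
    | nil =>
        rw [PySem.List.pyRange_neg_one_eq_nil (by simp)]
        simp [pvALoop]
    | cons p0 rest =>
        have hlen : (((p0 :: rest).length : Int) - 1) = (rest.length : Int) := by
          simp only [List.length_cons]; push_cast; ring
        rw [hlen, pvALoop_eq_ref, List.tail_cons, pvGet0_cons]
        have hfold := pvBFold_inv p0 rest facade_set rest.dropLast.length (le_refl _)
        rw [List.take_length] at hfold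
        rw [hfold]
        cases hr : rest with
        | nil =>
            simp only [List.dropLast_nil, List.length_nil, Nat.zero_add]
            rw [pvRef_succ]
            simp only [List.take_succ_cons, List.take_zero]
            rw [pvJoin_single]
            have hr0 : pvRef [p0] facade_set 0 = p0 := pvGet0_cons p0 []
            rw [hr0, ite_self]
        | cons b t =>
            have hlen2 : rest.dropLast.length + 1 = rest.length := by
              rw [hr]; simp
            rw [← hr, hlen2]
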